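-- pv_equiv track=rewrite | github.com/undefineduser76/PythonAlgorithmStudy | Week5/Q2/알알못.py | solution
-- ===== SOURCE A (Python) =====
-- def solution(n, s):
--     # 자연수 n개의 합으로 n보다 작은 s를 만들 수는 없으므로 [-1]을 리턴한다
--     if n > s: return [-1]
--     result = []
--     # s를 n으로 나눈 몫이 n개이도록 초기값을 정한다.
--     initial = s // n
--     for _ in range(n):
--         result.append(initial)
--     idx = len(result) - 1
--     # s를 n으로 나눈 몫에서 나머지만큼 각 값에 1씩 더해준다.
--     for _ in range(s % n):
--         result[idx] += 1
--         idx -=1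
--     return result
-- ===== SOURCE B (Python) =====
-- def solution(n, s):
--     if n > s:
--         return [-1]
--     out = []
--     while n > 0:
--         v = s // n          # floor of the average of what is still to distribute
--         out.append(v)
--         s -= v
--         n -= 1
--     return out
-- ===== Notes on version B (the rewrite author's own statement) =====
-- stated objective: alternative
-- what changed: Replaces A's fill-n-copies loop plus descending increment-the-tail loop with a single greedy pass: repeatedly emit the floor of the remaining average s//n, subtract it from s and decrement n, producing each element directly with no post-correction.
import Mathlib
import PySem

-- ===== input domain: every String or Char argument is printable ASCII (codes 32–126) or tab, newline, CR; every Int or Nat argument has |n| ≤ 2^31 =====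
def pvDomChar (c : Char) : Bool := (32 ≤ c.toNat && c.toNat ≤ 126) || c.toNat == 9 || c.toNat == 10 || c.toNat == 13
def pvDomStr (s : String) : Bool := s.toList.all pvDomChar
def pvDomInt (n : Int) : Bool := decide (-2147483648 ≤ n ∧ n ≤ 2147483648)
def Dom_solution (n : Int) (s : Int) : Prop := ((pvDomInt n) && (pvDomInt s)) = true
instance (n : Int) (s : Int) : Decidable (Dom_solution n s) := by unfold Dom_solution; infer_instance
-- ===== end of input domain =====

-- B replaces A's fill-then-increment-the-tail loops with a single greedy pass that emits
-- the floor of the remaining average s//n and subtracts it; objective: alternative.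


-- ===== PORT A =====
-- literal transliteration of A: fill loop, then 'result[idx] += 1; idx -= 1' repeated s % n
-- times (pySetD/pyGetD are exact here: inside Pre_ the index is always in range whenever the
-- loop body runs, so Python never raises IndexError).
def solution (n : Int) (s : Int) : List Int :=
  if n > s then [-1]
  else
    let initial := PySem.Int.floordiv s n
    let result := (PySem.List.pyRange 0 n 1).foldl (fun acc _ => acc ++ [initial]) []
    let st := (PySem.List.pyRange 0 (PySem.Int.mod s n) 1).foldl
      (fun (p : List Int × Int) _ =>
        (PySem.List.pySetD p.1 p.2 (PySem.List.pyGetD p.1 p.2 0 + 1), p.2 - 1))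
      (result, (result.length : Int) - 1)
    st.1

-- ===== PORT B =====
-- transliteration of B's while loop (mutating n, s and appending) as the obvious recursion
def solAltLoop (k : Int) (t : Int) : List Int :=
  if k > 0 then
    PySem.Int.floordiv t k :: solAltLoop (k - 1) (t - PySem.Int.floordiv t k)
  else []
termination_by k.toNat
decreasing_by simp_all

def solution_alt (n : Int) (s : Int) : List Int :=
  if n > s then [-1] else solAltLoop n s

-- ===== PRECONDITION & SPEC =====
-- Pre_ excludes exactly the inputs where A raises ZeroDivisionError (n = 0 with 0 ≤ s,
-- so the guard does not fire and s // 0 is evaluated).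
def Pre_solution (n : Int) (s : Int) : Prop := ¬ (n = 0 ∧ 0 ≤ s)
instance (n : Int) (s : Int) : Decidable (Pre_solution n s) := by unfold Pre_solution; infer_instance
def pvWitness_solution : Int × Int := (3, 11)
def Spec_solution (n : Int) (s : Int) (out : List Int) : Prop := out = solution_alt n s
instance (n : Int) (s : Int) (out : List Int) : Decidable (Spec_solution n s out) := by unfold Spec_solution; infer_instance

-- ===== CLAIM (what is proved, stated in full; the proofs are below) =====
def Claim_equal_solution : Prop := ∀ (n : Int) (s : Int), Dom_solution n s → Pre_solution n s → Spec_solution n s (solution n s)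

-- ===== LEMMAS AND PROOFS =====

-- a fold that ignores the elements only iterates its step function
theorem foldl_ignore_iterate {α β : Type} (f : β → β) (l : List α) (st : β) :
    l.foldl (fun s _ => f s) st = f^[l.length] st := by
  induction l generalizing st with
  | nil => rfl
  | cons x xs ih => simp [List.foldl, ih, Function.iterate_succ_apply]

-- the fill loop produces a replicate
theorem fill_loop (c : Int) (l : List Int) (init : List Int) :
    l.foldl (fun acc (_ : Int) => acc ++ [c]) init = init ++ List.replicate l.length c := by
  induction l generalizing init with
  | nil => simp
  | cons x xs ih =>
    rw [List.foldl_cons, ih, List.append_assoc]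
    simp [List.replicate_succ]

-- one step of A's increment loop on a two-block list
theorem inc_step (q : Int) (a b : Nat) (ha : 1 ≤ a) :
    (PySem.List.pySetD (List.replicate a q ++ List.replicate b (q + 1)) ((a : Int) - 1)
      (PySem.List.pyGetD (List.replicate a q ++ List.replicate b (q + 1)) ((a : Int) - 1) 0 + 1))
    = List.replicate (a - 1) q ++ List.replicate (b + 1) (q + 1) := by
  have h0 : (0:Int) ≤ (a : Int) - 1 := by omega
  have ht : ((a : Int) - 1).toNat = a - 1 := by omega
  rw [PySem.List.pySetD_of_nonneg _ _ h0, PySem.List.pyGetD_of_nonneg _ _ h0, ht]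
  have hget : (List.replicate a q ++ List.replicate b (q + 1)).getD (a - 1) 0 = q := by
    rw [List.getD_eq_getElem _ _ (by simp; omega)]
    rw [List.getElem_append_left (by simpa using by omega)]
    simp
  rw [hget]
  apply List.ext_getElem
  · simp only [List.length_set, List.length_append, List.length_replicate]; omega
  · intro i h1 h2
    simp only [List.getElem_set]
    by_cases hi : a - 1 = i
    · subst hi
      rw [if_pos rfl, List.getElem_append_right (by simp only [List.length_replicate]; omega)]
      simp
    · rcases Nat.lt_or_ge i (a - 1) with hlt' | hge
      · rw [List.getElem_append_left (by simpa using by omega),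
            List.getElem_append_left (by simpa using by omega)]
        simp [hi]
      · rw [List.getElem_append_right (by simp only [List.length_replicate]; omega),
            List.getElem_append_right (by simp only [List.length_replicate]; omega)]
        simp [hi]

-- k iterations of A's increment step turn the tail of a replicate into q+1's
theorem inc_iter (q : Int) : ∀ (k a b : Nat), k ≤ a →
    (fun (p : List Int × Int) =>
      (PySem.List.pySetD p.1 p.2 (PySem.List.pyGetD p.1 p.2 0 + 1), p.2 - 1))^[k]
      (List.replicate a q ++ List.replicate b (q + 1), (a : Int) - 1)
    = (List.replicate (a - k) q ++ List.replicate (b + k) (q + 1), (a : Int) - 1 - k) := by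
  intro k
  induction k with
  | zero => intro a b _; simp
  | succ m ih =>
    intro a b hk
    rw [Function.iterate_succ_apply]
    dsimp only
    rw [inc_step q a b (by omega)]
    have h1 : ((a : Int) - 1 - 1) = ((a - 1 : Nat) : Int) - 1 := by omega
    rw [h1, ih (a - 1) (b + 1) (by omega), Prod.mk.injEq,
        show a - 1 - m = a - (m + 1) by omega, show b + 1 + m = b + (m + 1) by omega]
    refine ⟨rfl, by push_cast; omega⟩

-- B's greedy loop on m*q + r (0 ≤ r < m) produces the two-block list
theorem altLoop_eq : ∀ (m : Nat) (q r : Int), 0 ≤ r → r < (m : Int) →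
    solAltLoop (m : Int) ((m : Int) * q + r)
      = List.replicate (m - r.toNat) q ++ List.replicate r.toNat (q + 1) := by
  intro m
  induction m with
  | zero => intro q r h0 h1; omega
  | succ p ih =>
    intro q r h0 h1
    rw [solAltLoop.eq_def]
    have h1' : r < (p : Int) + 1 := by exact_mod_cast h1
    have hfd : PySem.Int.floordiv (((p : Int) + 1) * q + r) ((p : Int) + 1) = q := by
      rw [PySem.Int.floordiv_eq_iff_of_pos (by omega)]
      constructor <;> nlinarith
    push_cast
    rw [if_pos (by omega), hfd]
    have harg : (↑p + 1) * q + r - q = (p : Int) * q + r := by ring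
    have hsub : ((p : Int) + 1 - 1) = (p : Int) := by ring
    rw [harg, hsub]
    by_cases hr : r < (p : Int)
    · rw [ih q r h0 hr]
      have : (p + 1) - r.toNat = ((p - r.toNat) + 1) := by omega
      rw [this, List.replicate_succ, List.cons_append]
    · have hrp : r = (p : Int) := by omega
      subst hrp
      have harg2 : (p : Int) * q + (p : Int) = (p : Int) * (q + 1) + 0 := by ring
      rw [harg2]
      by_cases hp : p = 0
      · subst hp; simp [solAltLoop]
      · rw [ih (q + 1) 0 le_rfl (by omega)]
        simp [show p + 1 - p = 1 from by omega]

theorem solAltLoop_nonpos (k t : Int) (hk : ¬ k > 0) : solAltLoop k t = [] := by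
  rw [solAltLoop.eq_def, if_neg hk]

theorem solution_eq_alt (n s : Int) (hpre : Pre_solution n s) :
    solution n s = solution_alt n s := by
  unfold solution solution_alt
  by_cases hgt : n > s
  · simp [hgt]
  · simp only [hgt, if_false]
    rcases lt_trichotomy n 0 with hn | hn | hn
    · -- n < 0: A's loops are empty, B's loop does not run
      have hb1 : n < PySem.Int.mod s n := (PySem.Int.mod_neg_bounds s hn).1
      have hb2 : PySem.Int.mod s n ≤ 0 := (PySem.Int.mod_neg_bounds s hn).2
      rw [PySem.List.pyRange_one_eq_nil (by omega),
          PySem.List.pyRange_one_eq_nil (by omega), solAltLoop_nonpos _ _ (by omega)]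
      simp
    · exact absurd ⟨hn, by omega⟩ hpre
    · -- n > 0
      have hr0 : 0 ≤ PySem.Int.mod s n := PySem.Int.mod_nonneg s hn
      have hrn : PySem.Int.mod s n < n := PySem.Int.mod_lt s hn
      set q := PySem.Int.floordiv s n with hq
      set r := PySem.Int.mod s n with hrdef
      rw [fill_loop, foldl_ignore_iterate]
      simp only [List.nil_append, List.length_replicate, PySem.List.length_pyRange_one]
      have hlen : ((n : Int) - 0).toNat = n.toNat := by omega
      have hlen2 : ((r : Int) - 0).toNat = r.toNat := by omega
      rw [hlen, hlen2]
      have hit := inc_iter q r.toNat n.toNat 0 (by omega)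
      have hrep : (List.replicate n.toNat q : List Int)
          = List.replicate n.toNat q ++ List.replicate 0 (q + 1) := by simp
      rw [hrep, hit]
      -- now the B side: s = n*q + r
      have hsum : q * n + r = s := PySem.Int.floordiv_mul_add_mod s n
      have hcast : ((n.toNat : Nat) : Int) = n := by omega
      have hB := altLoop_eq n.toNat q r hr0 (by omega)
      rw [hcast] at hB
      have harg : n * q + r = s := by linarith [hsum]
      rw [harg] at hB
      rw [hB]
      simp

-- ===== VERDICT (by name: the statement is the Claim_ definition above) =====
theorem solution_spec : Claim_equal_solution := by
  intro n s _ hpre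
  unfold Spec_solution
  exact solution_eq_alt n s hpre
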